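-- pv_equiv track=rewrite | github.com/akageo/goa-homework | test/test22.py | solve
-- ===== SOURCE A (Python) =====
-- def solve(a,b):
--     count = 0
--     for i in map(str, range(a, b)):
--         for j in i:
--             if j not in '853':
--                 break
--         else:
--             if i.count('8') >= i.count('5') >= i.count('3'): count += 1
--     return count
-- ===== SOURCE B (Python) =====
-- def solve(a, b):
--     # Instead of scanning every integer in [a, b), enumerate the numbers whose
--     # decimal digits all lie in {8,5,3} (at most 10 digits: the task's inputs
--     # satisfy |b| <= 2**31 < 10**10) level by level, tracking the digit counts,
--     # and count those that fall in [a, b) with count8 >= count5 >= count3.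
--     total = 0
--     level = [(8, 1, 0, 0), (5, 0, 1, 0), (3, 0, 0, 1)]
--     for _ in range(10):
--         for v, c8, c5, c3 in level:
--             if a <= v < b and c8 >= c5 >= c3:
--                 total += 1
--         level = [t for v, c8, c5, c3 in level
--                  for t in ((10 * v + 8, c8 + 1, c5, c3),
--                            (10 * v + 5, c8, c5 + 1, c3),
--                            (10 * v + 3, c8, c5, c3 + 1))]
--     return total
-- ===== Notes on version B (the rewrite author's own statement) =====
-- stated objective: alternative
-- what changed: Instead of scanning every integer in [a,b) and testing its decimal string, B enumerates the at most 3^1+...+3^10 numbers whose digits all lie in {8,5,3} (10 digits cover the |b| <= 2^31 domain), building them level by level while tracking the digit counts, and counts those in [a,b) with count8>=count5>=count3.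
import Mathlib
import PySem

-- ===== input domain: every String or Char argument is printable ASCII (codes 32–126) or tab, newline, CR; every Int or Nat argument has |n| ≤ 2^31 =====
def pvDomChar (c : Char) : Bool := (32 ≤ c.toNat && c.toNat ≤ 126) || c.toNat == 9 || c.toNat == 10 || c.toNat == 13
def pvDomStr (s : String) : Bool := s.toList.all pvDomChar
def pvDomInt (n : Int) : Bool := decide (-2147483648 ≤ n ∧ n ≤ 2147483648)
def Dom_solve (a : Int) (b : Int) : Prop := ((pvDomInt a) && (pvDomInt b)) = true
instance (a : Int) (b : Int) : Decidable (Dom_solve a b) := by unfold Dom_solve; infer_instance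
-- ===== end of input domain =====

-- B replaces A's scan of every integer in [a,b) by an enumeration of the numbers whose decimal
-- digits all lie in {8,5,3} (at most 10 digits, which covers the |b| ≤ 2^31 domain above),
-- built level by level while tracking the digit counts: its work does not depend on b - a.

-- ===== PORT A =====
-- inner loop 'for j in i: if j not in "853": break / else: …' — returns true iff no break fired
def allIn853 : List Char → Bool
  | [] => true
  | j :: rest => if j ∈ ['8', '5', '3'] then allIn853 rest else false

-- strings are handled as their character lists (PySem.Int.toChars = str(i));
-- i.count('8') for the single-character needle is exactly List.count '8' on those characters
def solve (a : Int) (b : Int) : Int :=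
  ((PySem.List.pyRange a b 1).map PySem.Int.toChars).foldl
    (fun count i =>
      if allIn853 i then
        if i.count '5' ≤ i.count '8' ∧ i.count '3' ≤ i.count '5' then count + 1 else count
      else count) 0

-- ===== PORT B =====
-- one level-extension step: each (v,c8,c5,c3) yields its three children 10*v+d, d ∈ {8,5,3}
def nextLevel (level : List (Int × Int × Int × Int)) : List (Int × Int × Int × Int) :=
  level.flatMap (fun t =>
    [(10 * t.1 + 8, t.2.1 + 1, t.2.2.1, t.2.2.2),
     (10 * t.1 + 5, t.2.1, t.2.2.1 + 1, t.2.2.2),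
     (10 * t.1 + 3, t.2.1, t.2.2.1, t.2.2.2 + 1)])

-- the inner counting loop over one level
def countLevel (a b total : Int) (level : List (Int × Int × Int × Int)) : Int :=
  level.foldl (fun tot t =>
    if a ≤ t.1 ∧ t.1 < b ∧ t.2.2.1 ≤ t.2.1 ∧ t.2.2.2 ≤ t.2.2.1 then tot + 1 else tot) total

def solve_alt (a : Int) (b : Int) : Int :=
  ((PySem.List.pyRange 0 10 1).foldl
    (fun st _ => (countLevel a b st.1 st.2, nextLevel st.2))
    (0, [(8, 1, 0, 0), (5, 0, 1, 0), (3, 0, 0, 1)])).1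

-- ===== PRECONDITION & SPEC =====
def Spec_solve (a : Int) (b : Int) (out : Int) : Prop := out = solve_alt a b
instance (a : Int) (b : Int) (out : Int) : Decidable (Spec_solve a b out) := by unfold Spec_solve; infer_instance

-- ===== CLAIM (what is proved, stated in full; the proofs are below) =====
def Claim_equal_solve : Prop := ∀ (a : Int) (b : Int), Dom_solve a b → Spec_solve a b (solve a b)

-- ===== LEMMAS AND PROOFS =====

-- A's predicate on the character list of one number
def predA (i : Int) : Bool :=
  let l := PySem.Int.toChars i
  allIn853 l && decide (l.count '5' ≤ l.count '8') && decide (l.count '3' ≤ l.count '5')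

-- B's predicate on one tuple
def predB (a b : Int) (t : Int × Int × Int × Int) : Bool :=
  decide (a ≤ t.1 ∧ t.1 < b ∧ t.2.2.1 ≤ t.2.1 ∧ t.2.2.2 ≤ t.2.2.1)

-- digit sequences (most significant first) over {8,5,3}, and their values
def seqs : Nat → List (List Nat)
  | 0 => [[]]
  | n + 1 => (seqs n).flatMap (fun ds => [ds ++ [8], ds ++ [5], ds ++ [3]])

def valOf (ds : List Nat) : Nat := ds.foldl (fun v d => 10 * v + d) 0

def tupOf (ds : List Nat) : Int × Int × Int × Int :=
  ((valOf ds : Int), (ds.count 8 : Int), (ds.count 5 : Int), (ds.count 3 : Int))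

lemma allIn853_eq (l : List Char) : allIn853 l = l.all (fun j => j ∈ ['8', '5', '3']) := by
  induction l with
  | nil => rfl
  | cons j rest ih =>
    by_cases h : j ∈ ['8', '5', '3'] <;> simp [allIn853, h, ih] <;> simp at h <;> tauto

lemma solve_eq_countP (a b : Int) :
    solve a b = ((PySem.List.pyRange a b 1).countP predA : Int) := by
  have hbody : (fun (count : Int) (i : List Char) =>
      if allIn853 i then
        if i.count '5' ≤ i.count '8' ∧ i.count '3' ≤ i.count '5' then count + 1 else count
      else count)
    = (fun (count : Int) (i : List Char) =>
        if (allIn853 i && decide (i.count '5' ≤ i.count '8') && decide (i.count '3' ≤ i.count '5'))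
        then count + 1 else count) := by
    funext count i
    by_cases h1 : allIn853 i <;> by_cases h2 : i.count '5' ≤ i.count '8' <;>
      by_cases h3 : i.count '3' ≤ i.count '5' <;> simp [h1, h2, h3]
  unfold solve
  rw [hbody, List.foldl_map,
    PySem.List.foldl_if_add_one
      (fun i => allIn853 (PySem.Int.toChars i) &&
        decide ((PySem.Int.toChars i).count '5' ≤ (PySem.Int.toChars i).count '8') &&
        decide ((PySem.Int.toChars i).count '3' ≤ (PySem.Int.toChars i).count '5'))]
  show (0:Int) + _ = _
  rw [zero_add]; rfl

lemma countLevel_eq (a b t : Int) (lvl : List (Int × Int × Int × Int)) :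
    countLevel a b t lvl = t + (lvl.countP (predB a b) : Int) := by
  unfold countLevel
  rw [PySem.List.foldl_ite_add_one
    (fun t : Int × Int × Int × Int => a ≤ t.1 ∧ t.1 < b ∧ t.2.2.1 ≤ t.2.1 ∧ t.2.2.2 ≤ t.2.2.1)]
  rfl

lemma tupOf_append (ds : List Nat) (d : Nat) :
    tupOf (ds ++ [d]) =
      (10 * (tupOf ds).1 + (d : Int),
       (tupOf ds).2.1 + (if d = 8 then 1 else 0),
       (tupOf ds).2.2.1 + (if d = 5 then 1 else 0),
       (tupOf ds).2.2.2 + (if d = 3 then 1 else 0)) := by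
  have hv : valOf (ds ++ [d]) = 10 * valOf ds + d := by
    unfold valOf; rw [List.foldl_append]; rfl
  simp only [tupOf, hv, List.count_append]
  refine Prod.ext ?_ (Prod.ext ?_ (Prod.ext ?_ ?_)) <;> simp <;>
    split_ifs <;> simp_all

lemma nextLevel_map (n : Nat) :
    nextLevel ((seqs n).map tupOf) = (seqs (n + 1)).map tupOf := by
  show ((seqs n).map tupOf).flatMap _ = _
  rw [List.flatMap_map]
  conv_rhs => rw [seqs, List.map_flatMap]
  refine List.flatMap_congr (fun ds _ => ?_)
  simp only [List.map_cons, List.map_nil, tupOf_append]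
  norm_num

lemma foldB (a b : Int) : ∀ (l : List Int) (t : Int) (k : Nat),
    (l.foldl (fun st (_ : Int) => (countLevel a b st.1 st.2, nextLevel st.2))
        (t, (seqs (k + 1)).map tupOf)).1
      = t + (((List.range l.length).flatMap (fun j => seqs (k + 1 + j))).countP
              (fun ds => predB a b (tupOf ds)) : Int) := by
  intro l
  induction l with
  | nil => simp
  | cons x l ih =>
    intro t k
    rw [List.foldl_cons, countLevel_eq, nextLevel_map, ih _ (k + 1)]
    have hr : List.range (x :: l).length = 0 :: (List.range l.length).map (· + 1) := by
      simp [List.range_succ_eq_map]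
    rw [hr, List.flatMap_cons, List.flatMap_map, List.countP_append]
    have : ∀ j : Nat, k + 1 + 1 + j = k + 1 + (j + 1) := by omega
    simp only [Function.comp_def, this, List.countP_map]
    push_cast
    ring

lemma solve_alt_eq_countP (a b : Int) :
    solve_alt a b =
      (((List.range 10).flatMap (fun k => seqs (k + 1))).countP (fun ds => predB a b (tupOf ds)) : Int) := by
  have hinit : [((8 : Int), (1 : Int), (0 : Int), (0 : Int)), (5, 0, 1, 0), (3, 0, 0, 1)]
      = (seqs 1).map tupOf := by decide
  unfold solve_alt
  rw [hinit]
  have h := foldB a b (PySem.List.pyRange 0 10 1) 0 0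
  simp only [zero_add] at h
  rw [h]
  have h1 : ∀ j : Nat, 0 + 1 + j = j + 1 := by omega
  simp only [h1, PySem.List.length_pyRange_one]
  rfl

-- toChars of a positive number is its base-10 digits, most significant first
lemma toDigitsCore_eq (f : Nat) : ∀ (n : Nat) (acc : List Char), 0 < n → n < f →
    Nat.toDigitsCore 10 f n acc = ((Nat.digits 10 n).reverse.map Nat.digitChar) ++ acc := by
  induction f with
  | zero => intro n acc h hf; omega
  | succ f ih =>
    intro n acc h hf
    rw [Nat.toDigitsCore]
    have hd : Nat.digits 10 n = n % 10 :: Nat.digits 10 (n / 10) := Nat.digits_def' (by norm_num) h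
    by_cases h0 : n / 10 = 0
    · simp [h0, hd]
    · simp only [h0, if_false]
      rw [ih (n / 10) _ (Nat.pos_of_ne_zero h0) (by omega), hd]
      simp

lemma toChars_pos (n : Nat) (h : 0 < n) :
    PySem.Int.toChars (n : Int) = (Nat.digits 10 n).reverse.map Nat.digitChar := by
  unfold PySem.Int.toChars
  rw [if_neg (by omega)]
  have := toDigitsCore_eq (n + 1) n [] (by simpa using h) (by omega)
  simpa [Nat.toDigits] using this

lemma mem_seqs {n : Nat} {ds : List Nat} :
    ds ∈ seqs n ↔ ds.length = n ∧ ∀ d ∈ ds, d ∈ [8, 5, 3] := by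
  induction n generalizing ds with
  | zero => simp [seqs, List.length_eq_zero_iff]; rintro rfl; simp
  | succ n ih =>
    constructor
    · intro hmem
      simp only [seqs, List.mem_flatMap] at hmem
      obtain ⟨ds', hds', hmem⟩ := hmem
      obtain ⟨hl, hall⟩ := ih.mp hds'
      fin_cases hmem <;>
        refine ⟨by simp [hl], fun d hd => ?_⟩ <;>
        rcases List.mem_append.mp hd with h | h <;> first | exact hall d h | simp_all
    · rintro ⟨hl, hall⟩
      have hne : ds ≠ [] := by intro hn; subst hn; simp at hl
      have hsplit := List.dropLast_append_getLast hne
      have hlast : ds.getLast hne ∈ [8, 5, 3] := hall _ (List.getLast_mem hne)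
      have hdrop : ds.dropLast ∈ seqs n := by
        refine ih.mpr ⟨by simp [List.length_dropLast, hl], fun d hd => hall d (List.dropLast_subset _ hd)⟩
      simp only [seqs, List.mem_flatMap]
      refine ⟨ds.dropLast, hdrop, ?_⟩
      simp at hlast
      rcases hlast with h | h | h <;> rw [← hsplit] <;> simp [h]

lemma seqs_length {n : Nat} {ds : List Nat} (h : ds ∈ seqs n) : ds.length = n :=
  (mem_seqs.mp h).1

lemma nodup_seqs (n : Nat) : (seqs n).Nodup := by
  induction n with
  | zero => simp [seqs]
  | succ n ih =>
    rw [seqs, List.nodup_flatMap]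
    refine ⟨fun ds _ => by simp, ?_⟩
    refine List.Pairwise.imp_of_mem ?_ ih
    intro ds ds' hds hds' hne
    have hl : ds.length = ds'.length := by rw [seqs_length hds, seqs_length hds']
    intro x hx hx'
    simp only [List.mem_cons, List.not_mem_nil, or_false] at hx hx'
    have : ds = ds' := by
      rcases hx with rfl | rfl | rfl <;> rcases hx' with h | h | h <;>
        exact (List.append_inj h hl).1
    exact hne this

lemma valOf_aux : ∀ (ds : List Nat) (acc : Nat),
    ds.foldl (fun v d => 10 * v + d) acc = acc * 10 ^ ds.length + Nat.ofDigits 10 ds.reverse := by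
  intro ds
  induction ds with
  | nil => intro acc; simp
  | cons d t ih =>
    intro acc
    rw [List.foldl_cons, ih]
    have : Nat.ofDigits 10 (d :: t).reverse
        = Nat.ofDigits 10 t.reverse + 10 ^ t.length * d := by
      rw [List.reverse_cons, Nat.ofDigits_append]
      simp [Nat.ofDigits_singleton]
    rw [this]
    simp [List.length_cons, pow_succ]
    ring

lemma valOf_eq_ofDigits (ds : List Nat) : valOf ds = Nat.ofDigits 10 ds.reverse := by
  unfold valOf
  rw [valOf_aux]
  simp

lemma digits_valOf {ds : List Nat} (hmem : ∀ d ∈ ds, d ∈ [8, 5, 3]) (hne : ds ≠ []) :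
    Nat.digits 10 (valOf ds) = ds.reverse := by
  rw [valOf_eq_ofDigits]
  refine Nat.digits_ofDigits 10 (by norm_num) _ (fun d hd => ?_) (fun hne' => ?_)
  · have := hmem d (by simpa using hd)
    simp at this
    rcases this with rfl | rfl | rfl <;> norm_num
  · obtain ⟨d, t, rfl⟩ := List.exists_cons_of_ne_nil hne
    rw [show (d :: t).reverse.getLast hne' = d from by simp [List.reverse_cons]]
    have := hmem d (by simp)
    simp at this
    rcases this with rfl | rfl | rfl <;> norm_num

lemma valOf_pos {ds : List Nat} (hmem : ∀ d ∈ ds, d ∈ [8, 5, 3]) (hne : ds ≠ []) :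
    0 < valOf ds := by
  have hd := digits_valOf hmem hne
  rcases Nat.eq_zero_or_pos (valOf ds) with h0 | h
  · exfalso
    rw [h0] at hd
    have : ds.reverse = [] := by simpa using hd.symm
    exact hne (by simpa using this)
  · exact h

-- predA at a positive number, in terms of its digit list
lemma predA_of_digits {ds : List Nat} (hmem : ∀ d ∈ ds, d ∈ [8, 5, 3]) (hne : ds ≠ []) :
    predA (valOf ds : Int) =
      (decide (ds.count 5 ≤ ds.count 8) && decide (ds.count 3 ≤ ds.count 5)) := by
  have hpos := valOf_pos hmem hne
  have hchars : PySem.Int.toChars (valOf ds : Int) = ds.map Nat.digitChar := by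
    rw [toChars_pos _ hpos, digits_valOf hmem hne, List.reverse_reverse]
  have hall : allIn853 (ds.map Nat.digitChar) = true := by
    rw [allIn853_eq, List.all_map]
    refine List.all_eq_true.mpr (fun d hd => ?_)
    have h1 := hmem d hd
    fin_cases h1 <;> decide
  have hcnt : ∀ k ∈ [8, 5, 3], (ds.map Nat.digitChar).count (Nat.digitChar k) = ds.count k := by
    intro k hk
    rw [List.count, List.countP_map, List.count]
    refine List.countP_congr (fun d hd => ?_)
    have h1 := hmem d hd
    fin_cases h1 <;> fin_cases hk <;> decide
  simp only [predA, hchars]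
  rw [show '8' = Nat.digitChar 8 from rfl, show '5' = Nat.digitChar 5 from rfl,
      show '3' = Nat.digitChar 3 from rfl,
      hcnt 8 (by decide), hcnt 5 (by decide), hcnt 3 (by decide), hall]
  simp

lemma predA_neg {i : Int} (h : i < 0) : predA i = false := by
  simp only [predA, PySem.Int.toChars, if_pos h]
  simp [allIn853]

lemma predA_pos_shape {i : Int} (h : predA i = true) :
    0 < i ∧ (∀ d ∈ Nat.digits 10 i.toNat, d ∈ [8, 5, 3]) := by
  rcases lt_trichotomy i 0 with hneg | rfl | hpos
  · rw [predA_neg hneg] at h; exact absurd h (by simp)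
  · exact absurd h (by decide)
  · refine ⟨hpos, fun d hd => ?_⟩
    have hi : ((i.toNat : Nat) : Int) = i := Int.toNat_of_nonneg (le_of_lt hpos)
    have hchars : PySem.Int.toChars i = (Nat.digits 10 i.toNat).reverse.map Nat.digitChar := by
      rw [← hi]; exact toChars_pos _ (by omega)
    have hall : allIn853 (PySem.Int.toChars i) = true := by
      simp only [predA, Bool.and_eq_true] at h
      exact h.1.1
    rw [hchars, allIn853_eq, List.all_map, List.all_eq_true] at hall
    have hmem := hall d (by simpa using hd)
    have hlt : d < 10 := Nat.digits_lt_base (by norm_num) hd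
    have hd3 : d = 3 ∨ d = 5 ∨ d = 8 := by
      clear hd hchars h
      interval_cases d <;> revert hmem <;> decide
    rcases hd3 with rfl | rfl | rfl <;> simp

-- the candidate pool: all digit sequences over {8,5,3} of length 1..10
def pool : List (List Nat) := (List.range 10).flatMap (fun k => seqs (k + 1))

lemma mem_pool {ds : List Nat} :
    ds ∈ pool ↔ (1 ≤ ds.length ∧ ds.length ≤ 10) ∧ ∀ d ∈ ds, d ∈ [8, 5, 3] := by
  unfold pool
  simp only [List.mem_flatMap, List.mem_range]
  constructor
  · rintro ⟨k, hk, hds⟩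
    obtain ⟨hl, hall⟩ := mem_seqs.mp hds
    exact ⟨⟨by omega, by omega⟩, hall⟩
  · rintro ⟨⟨h1, h10⟩, hall⟩
    exact ⟨ds.length - 1, by omega, mem_seqs.mpr ⟨by omega, hall⟩⟩

lemma nodup_pool : pool.Nodup := by
  unfold pool
  rw [List.nodup_flatMap]
  refine ⟨fun k _ => nodup_seqs _, ?_⟩
  refine List.Pairwise.imp ?_ (List.nodup_range)
  intro k k' hne ds hds hds'
  exact hne (by have := seqs_length hds; have := seqs_length hds'; omega)

lemma valOf_inj {ds ds' : List Nat}
    (h1 : ∀ d ∈ ds, d ∈ [8, 5, 3]) (hn1 : ds ≠ [])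
    (h2 : ∀ d ∈ ds', d ∈ [8, 5, 3]) (hn2 : ds' ≠ [])
    (h : valOf ds = valOf ds') : ds = ds' := by
  have := digits_valOf h1 hn1
  have h' := digits_valOf h2 hn2
  rw [h, h'] at this
  exact (by simpa using congrArg List.reverse this : ds' = ds).symm

lemma main_eq (a b : Int) (hdom : Dom_solve a b) : solve a b = solve_alt a b := by
  rw [solve_eq_countP, solve_alt_eq_countP]
  have hb : b ≤ 2147483648 := by
    unfold Dom_solve pvDomInt at hdom
    simp only [Bool.and_eq_true, decide_eq_true_eq] at hdom
    exact hdom.2.2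
  congr 1
  rw [List.countP_eq_length_filter, List.countP_eq_length_filter]
  set RA := (PySem.List.pyRange a b 1).filter predA with hRA
  set FB := pool.filter (fun ds => predB a b (tupOf ds)) with hFB
  have hFBmem : ∀ ds ∈ FB, (∀ d ∈ ds, d ∈ [8, 5, 3]) ∧ ds ≠ [] := by
    intro ds hds
    have hp := (mem_pool.mp (List.mem_of_mem_filter hds))
    exact ⟨hp.2, by intro hn; subst hn; simp at hp⟩
  have hperm : RA.Perm (FB.map (fun ds => (valOf ds : Int))) := by
    rw [List.perm_ext_iff_of_nodup ((PySem.List.nodup_pyRange_one a b).filter _)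
      (List.Nodup.map_on ?_ (nodup_pool.filter _))]
    · intro x
      rw [List.mem_filter, PySem.List.mem_pyRange_one, List.mem_map]
      constructor
      · rintro ⟨⟨hax, hxb⟩, hpa⟩
        obtain ⟨hpos, hdig⟩ := predA_pos_shape hpa
        set n := x.toNat with hn
        have hx : (n : Int) = x := Int.toNat_of_nonneg (le_of_lt hpos)
        have hnz : n ≠ 0 := by omega
        set ds := (Nat.digits 10 n).reverse with hds
        have hmem' : ∀ d ∈ ds, d ∈ [8, 5, 3] := fun d hd => hdig d (by simpa [hds] using hd)
        have hne : ds ≠ [] := by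
          simpa [hds] using Nat.digits_ne_nil_iff_ne_zero.mpr hnz
        have hval : valOf ds = n := by
          rw [valOf_eq_ofDigits, hds, List.reverse_reverse, Nat.ofDigits_digits]
        have hlen : ds.length ≤ 10 := by
          by_contra hgt
          have h11 : 11 ≤ (Nat.digits 10 n).length := by simp [hds] at hgt; omega
          have := Nat.base_pow_length_digits_le 10 n (by norm_num) hnz
          have hpow : (10 : Nat) ^ 11 ≤ 10 ^ (Nat.digits 10 n).length :=
            Nat.pow_le_pow_right (by norm_num) h11
          have hxn : n ≤ 2147483647 := by omega
          have : (10 : Nat) ^ 11 ≤ 10 * n := le_trans hpow this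
          norm_num at this
          omega
        have hcnts := predA_of_digits hmem' hne
        rw [hval, hx] at hcnts
        rw [hpa] at hcnts
        have hc : ds.count 5 ≤ ds.count 8 ∧ ds.count 3 ≤ ds.count 5 := by
          have := hcnts.symm
          simp only [Bool.and_eq_true, decide_eq_true_eq] at this
          exact this
        refine ⟨ds, ?_, by rw [hval, hx]⟩
        rw [List.mem_filter]
        refine ⟨mem_pool.mpr ⟨⟨by simpa using List.length_pos_iff.mpr hne, hlen⟩, hmem'⟩, ?_⟩
        simp only [predB, tupOf, decide_eq_true_eq]
        refine ⟨by rw [hval, hx]; exact hax, by rw [hval, hx]; exact hxb, ?_, ?_⟩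
        · exact_mod_cast hc.1
        · exact_mod_cast hc.2
      · rintro ⟨ds, hds, rfl⟩
        obtain ⟨hmem', hne⟩ := hFBmem ds hds
        have hpb := (List.mem_filter.mp hds).2
        simp only [predB, tupOf, decide_eq_true_eq] at hpb
        obtain ⟨hax, hxb, hc5, hc3⟩ := hpb
        refine ⟨⟨hax, hxb⟩, ?_⟩
        rw [predA_of_digits hmem' hne]
        simp only [Bool.and_eq_true, decide_eq_true_eq]
        exact ⟨by exact_mod_cast hc5, by exact_mod_cast hc3⟩
    · intro ds hds ds' hds' hval
      obtain ⟨hm1, hn1⟩ := hFBmem ds hds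
      obtain ⟨hm2, hn2⟩ := hFBmem ds' hds'
      exact valOf_inj hm1 hn1 hm2 hn2 (by exact_mod_cast hval)
  calc RA.length = (FB.map (fun ds => (valOf ds : Int))).length := hperm.length_eq
    _ = FB.length := List.length_map ..

-- ===== VERDICT (by name: the statement is the Claim_ definition above) =====
theorem solve_spec : Claim_equal_solve := by
  intro a b hdom
  exact main_eq a b hdom
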